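-- pv_equiv track=rewrite | github.com/L1nc0ln/hashing_algo_bda_test | masters-thesis/code/com/haw_landshut/s_mkaspe/thesis/main/main_module.py | checkForCollisions
-- ===== SOURCE A (Python) =====
-- def checkForCollisions(result_dict, hashed_array):
--     """
--     @param result_dict: dict containing all hashed values so far
--     @param hashed_array: list with new hashed values
--     @return: the number of detected collisions
--     """
--     num_collisions = 0
--     #check for collisions in returned array
--     for hash_val in hashed_array:
--         if hash_val in result_dict:
--             num_collisions += 1
--         else:
--             result_dict[hash_val] = 1
--     return num_collisions
-- ===== SOURCE B (Python) =====
-- def checkForCollisions(result_dict, hashed_array):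
--     """
--     @param result_dict: dict containing all hashed values so far
--     @param hashed_array: list with new hashed values
--     @return: the number of detected collisions
--     """
--     # Stage 1: aggregate the new hashes into a frequency map.
--     counts = {}
--     for hash_val in hashed_array:
--         counts[hash_val] = counts.get(hash_val, 0) + 1
--     # Stage 2: per DISTINCT hash, all m occurrences collide if it is already
--     # known, otherwise the first occurrence is new and the other m-1 collide.
--     collisions = sum(mult if key in result_dict else mult - 1
--                      for key, mult in counts.items())
--     # Record the previously unknown hashes (same side effect as A).
--     for key in counts:
--         if key not in result_dict:
--             result_dict[key] = 1
--     return collisions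
-- ===== Notes on version B (the rewrite author's own statement) =====
-- stated objective: alternative
-- what changed: Replaces A's single pass that tests each element against the dict by two stages: first build a frequency map of the new hashes, then compute collisions per DISTINCT key by multiplicity arithmetic (m for an already-known key, m-1 for a new one) and bulk-insert the new keys afterwards.
import Mathlib
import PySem

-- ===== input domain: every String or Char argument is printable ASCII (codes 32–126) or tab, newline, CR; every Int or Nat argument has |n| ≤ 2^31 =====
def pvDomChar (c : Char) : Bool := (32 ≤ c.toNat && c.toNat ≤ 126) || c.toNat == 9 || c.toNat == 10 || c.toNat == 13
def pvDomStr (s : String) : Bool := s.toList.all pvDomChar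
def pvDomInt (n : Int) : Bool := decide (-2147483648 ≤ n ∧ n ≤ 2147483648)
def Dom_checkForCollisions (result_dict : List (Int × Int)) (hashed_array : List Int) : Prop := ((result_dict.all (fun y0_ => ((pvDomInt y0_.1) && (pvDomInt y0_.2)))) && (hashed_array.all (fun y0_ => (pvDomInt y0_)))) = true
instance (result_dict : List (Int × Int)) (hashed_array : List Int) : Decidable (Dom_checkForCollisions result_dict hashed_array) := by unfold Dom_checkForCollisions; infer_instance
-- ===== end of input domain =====

-- B replaces A's single membership-testing pass by two stages: a frequency map of the new
-- hashes, then per-distinct-key arithmetic (m collisions for a known key, m-1 for a new one);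
-- both Pythons mutate result_dict identically — the equivalence proved is about the return value.

-- ===== PORT A =====
def checkForCollisions (result_dict : List (Int × Int)) (hashed_array : List Int) : Int :=
  (hashed_array.foldl
    (fun (st : PySem.Dict Int Int × Int) hash_val =>
      if st.1.contains hash_val then (st.1, st.2 + 1) else (st.1.insert hash_val 1, st.2))
    (PySem.Dict.mk result_dict, 0)).2

-- ===== PORT B =====
def checkForCollisions_alt (result_dict : List (Int × Int)) (hashed_array : List Int) : Int :=
  let counts : PySem.Dict Int Int :=
    hashed_array.foldl (fun d hash_val => d.insert hash_val (d.getD hash_val 0 + 1))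
      PySem.Dict.empty
  (counts.items.map
    (fun kv => if (PySem.Dict.mk result_dict).contains kv.1 then kv.2 else kv.2 - 1)).sum

-- ===== PRECONDITION & SPEC =====
def Spec_checkForCollisions (result_dict : List (Int × Int)) (hashed_array : List Int) (out : Int) : Prop := out = checkForCollisions_alt result_dict hashed_array
instance (result_dict : List (Int × Int)) (hashed_array : List Int) (out : Int) : Decidable (Spec_checkForCollisions result_dict hashed_array out) := by unfold Spec_checkForCollisions; infer_instance

-- ===== CLAIM (what is proved, stated in full; the proofs are below) =====
def Claim_equal_checkForCollisions : Prop := ∀ (result_dict : List (Int × Int)) (hashed_array : List Int), Dom_checkForCollisions result_dict hashed_array → Spec_checkForCollisions result_dict hashed_array (checkForCollisions result_dict hashed_array)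

-- ===== LEMMAS AND PROOFS =====

-- A's loop, from any dict d and start count c, counts len minus the number of distinct keys not in d.
theorem checkForCollisions_loop (ha : List Int) :
    ∀ (d : PySem.Dict Int Int) (c : Int),
      (ha.foldl
        (fun (st : PySem.Dict Int Int × Int) hash_val =>
          if st.1.contains hash_val then (st.1, st.2 + 1) else (st.1.insert hash_val 1, st.2))
        (d, c)).2
      = c + (ha.length : Int)
          - ((PySem.Set.diff (PySem.Set.ofList ha) d.keys).length : Int) := by
  induction ha with
  | nil => intro d c; simp [PySem.Set.diff, PySem.Set.ofList, PySem.Set.empty]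
  | cons h t ih =>
    intro d c
    by_cases hc : d.contains h = true
    · have hmem : h ∈ d.keys := (PySem.Dict.contains_iff_mem_keys d h).mp hc
      have hfilt :
          PySem.Set.diff (PySem.Set.ofList (h :: t)) d.keys
            = PySem.Set.diff (PySem.Set.ofList t) d.keys := by
        rw [PySem.Set.ofList_cons]
        simp only [PySem.Set.diff, PySem.Set.discard, PySem.Set.contains,
          List.filter_cons, List.filter_filter]
        rw [if_neg (by simp [hmem])]
        apply List.filter_congr
        intro x hx
        by_cases hxh : x = h
        · subst hxh; simp [hmem]
        · simp [hxh]
      simp only [List.foldl_cons]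
      rw [if_pos hc, ih, hfilt, List.length_cons]
      push_cast
      ring
    · have hcf : d.contains h = false := by simpa using hc
      have hmem : h ∉ d.keys := fun hm => hc ((PySem.Dict.contains_iff_mem_keys d h).mpr hm)
      have hkeys : (d.insert h 1).keys = d.keys ++ [h] := by
        simp [PySem.Dict.keys_insert_of_not_contains, hcf]
      have hleft :
          PySem.Set.diff (PySem.Set.ofList t) (d.insert h 1).keys
            = List.filter (fun a => !(List.contains d.keys a) && !(a == h)) (PySem.Set.ofList t) := by
        rw [hkeys]
        simp only [PySem.Set.diff, PySem.Set.contains]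
        apply List.filter_congr
        intro x hx
        by_cases hxh : x = h
        · subst hxh; simp [hmem]
        · by_cases hxk : x ∈ d.keys <;>
            simp [List.mem_append, hxh, hxk]
      have hright :
          PySem.Set.diff (PySem.Set.ofList (h :: t)) d.keys
            = h :: List.filter (fun a => !(List.contains d.keys a) && !(a == h)) (PySem.Set.ofList t) := by
        rw [PySem.Set.ofList_cons]
        simp only [PySem.Set.diff, PySem.Set.discard, PySem.Set.contains,
          List.filter_cons, List.filter_filter]
        rw [if_pos (by simp [hmem])]
      simp only [List.foldl_cons]
      rw [if_neg hc, ih, hleft, hright]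
      simp only [List.length_cons]
      push_cast
      ring

-- B's per-distinct-key sum splits into (the multiplicity sum) minus (the number of new keys).
theorem alt_sum_split (d : PySem.Dict Int Int) (f : Int → Int) :
    ∀ s : List Int,
      ((s.map (fun k => if d.contains k then f k else f k - 1)).sum : Int)
        = (s.map f).sum - ((PySem.Set.diff s d.keys).length : Int) := by
  intro s
  induction s with
  | nil => simp [PySem.Set.diff]
  | cons h t ih =>
    by_cases hc : d.contains h = true
    · have hmem : h ∈ d.keys := (PySem.Dict.contains_iff_mem_keys d h).mp hc
      simp only [List.map_cons, List.sum_cons, if_pos hc, ih,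
        PySem.Set.diff, PySem.Set.contains, List.filter_cons]
      rw [if_neg (by simp [hmem])]
      ring
    · have hmem : h ∉ d.keys := fun hm => hc ((PySem.Dict.contains_iff_mem_keys d h).mpr hm)
      simp only [List.map_cons, List.sum_cons, if_neg hc, ih,
        PySem.Set.diff, PySem.Set.contains, List.filter_cons]
      rw [if_pos (by simp [hmem])]
      simp only [List.length_cons]
      push_cast
      ring

-- The multiplicities of the distinct elements of ha sum to ha's length.
theorem sum_counts_distinct (ha : List Int) :
    ((PySem.Set.ofList ha).map (fun k => (ha.count k : Int))).sum = (ha.length : Int) := by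
  have hperm : (PySem.Set.ofList ha).Perm ha.dedup := by
    rw [List.perm_ext_iff_of_nodup (PySem.Set.nodup_ofList ha) ha.nodup_dedup]
    intro a
    simp [PySem.Set.mem_ofList, List.mem_dedup]
  have := List.Perm.map (fun k => (ha.count k : Int)) hperm
  rw [this.sum_eq]
  have hnat : (ha.dedup.map fun k => ha.count k).sum = ha.length :=
    List.sum_map_count_dedup_eq_length ha
  calc (ha.dedup.map fun k => (ha.count k : Int)).sum
      = ((ha.dedup.map fun k => ha.count k).sum : Int) := by
        rw [Nat.cast_list_sum, List.map_map]; rfl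
    _ = (ha.length : Int) := by rw [hnat]

-- ===== VERDICT (by name: the statement is the Claim_ definition above) =====
theorem checkForCollisions_spec : Claim_equal_checkForCollisions := by
  intro result_dict hashed_array _
  simp only [Spec_checkForCollisions, checkForCollisions, checkForCollisions_alt]
  rw [checkForCollisions_loop]
  rw [PySem.Dict.foldl_insert_getD_add_one_eq_counter, PySem.Dict.items_counter,
    List.map_map]
  have := alt_sum_split (PySem.Dict.mk result_dict) (fun k => (hashed_array.count k : Int))
    (PySem.Set.ofList hashed_array)
  simp only [Function.comp_def] at this ⊢
  rw [this, sum_counts_distinct]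
  ring
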